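-- pv_equiv track=rewrite | github.com/isawnyu/pleiades-normalizer | pleiades/normalizer/base.py | cropName
-- ===== SOURCE A (Python) =====
-- MAX_LENGTH = 120
--
-- def cropName(base, maxLength=MAX_LENGTH):
--     baseLength = len(base)
--
--     index = baseLength
--     while index > maxLength:
--         index = base.rfind('-', 0, index)
--
--     if index == -1 and baseLength > maxLength:
--         base = base[: maxLength]
--
--     elif index > 0:
--         base = base[: index]
--
--     return base
-- ===== SOURCE B (Python) =====
-- MAX_LENGTH = 120
--
-- def cropName(base, maxLength=MAX_LENGTH):
--     if len(base) <= maxLength: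
--         return base
--     last = -1
--     for i, ch in enumerate(base[:maxLength + 1]):
--         if ch == '-':
--             last = i
--     if last == -1:
--         return base[:maxLength]
--     if last > 0:
--         return base[:last]
--     return base
-- ===== Notes on version B (the rewrite author's own statement) =====
-- stated objective: alternative
-- what changed: Replaces A's backward while-loop of repeated str.rfind calls with a single forward scan that keeps the index of the last hyphen seen within the limit, after an early return when the string already fits.
import Mathlib
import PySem

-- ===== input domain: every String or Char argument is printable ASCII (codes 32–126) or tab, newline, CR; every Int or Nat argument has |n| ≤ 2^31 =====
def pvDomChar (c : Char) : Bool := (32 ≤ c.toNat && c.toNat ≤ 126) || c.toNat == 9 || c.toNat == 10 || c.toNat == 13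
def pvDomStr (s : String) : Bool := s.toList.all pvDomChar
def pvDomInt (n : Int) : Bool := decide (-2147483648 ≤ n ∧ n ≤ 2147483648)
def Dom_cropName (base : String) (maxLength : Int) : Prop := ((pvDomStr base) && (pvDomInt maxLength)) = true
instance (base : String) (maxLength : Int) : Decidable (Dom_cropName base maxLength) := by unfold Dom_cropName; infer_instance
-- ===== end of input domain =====

-- B replaces A's backward while-loop of repeated rfind calls with one forward scan keeping the last hyphen index (same cost, different decomposition).

-- ===== PORT A =====
-- the 'while index > maxLength: index = base.rfind('-', 0, index)' loop; the fuel
-- argument only makes the (possibly non-terminating) while loop total — inside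
-- Pre_ the loop index strictly decreases, so fuel = len(base)+2 is never exhausted
def cropLoop (base : String) (maxLength : Int) (fuel : Nat) (index : Int) : Int :=
  match fuel with
  | 0 => index
  | fuel + 1 =>
      if maxLength < index then
        cropLoop base maxLength fuel (PySem.Str.rfindFrom base "-" 0 (some index))
      else index

def cropName (base : String) (maxLength : Int) : String :=
  let baseLength : Int := PySem.Str.len base
  let index : Int := cropLoop base maxLength (baseLength.toNat + 2) baseLength
  if index = -1 ∧ maxLength < baseLength then PySem.Str.slice base none (some maxLength)
  else if 0 < index then PySem.Str.slice base none (some index)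
  else base

-- ===== PORT B =====
def cropName_alt (base : String) (maxLength : Int) : String :=
  if PySem.Str.len base ≤ maxLength then base
  else
    let last : Int :=
      (PySem.List.enumerate (PySem.Str.slice base none (some (maxLength + 1))).toList).foldl
        (fun last ic => if ic.2 = '-' then ic.1 else last) (-1)
    if last = -1 then PySem.Str.slice base none (some maxLength)
    else if 0 < last then PySem.Str.slice base none (some last)
    else base

-- ===== PRECONDITION & SPEC =====
-- Pre_ excludes exactly maxLength ≤ -2, where A's while loop never terminates
-- (rfind keeps returning values > maxLength, cycling at -1), so A returns nothing there.
def Pre_cropName (base : String) (maxLength : Int) : Prop := -1 ≤ maxLength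
instance (base : String) (maxLength : Int) : Decidable (Pre_cropName base maxLength) := by unfold Pre_cropName; infer_instance
def pvWitness_cropName : String × Int := ("ab-cd-ef", 5)

def Spec_cropName (base : String) (maxLength : Int) (out : String) : Prop := out = cropName_alt base maxLength
instance (base : String) (maxLength : Int) (out : String) : Decidable (Spec_cropName base maxLength out) := by unfold Spec_cropName; infer_instance

-- ===== CLAIM (what is proved, stated in full; the proofs are below) =====
def Claim_equal_cropName : Prop := ∀ (base : String) (maxLength : Int), Dom_cropName base maxLength → Pre_cropName base maxLength → Spec_cropName base maxLength (cropName base maxLength)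

-- ===== LEMMAS AND PROOFS =====

-- B's forward accumulator: index of the last '-' in cs, or -1
def accF (cs : List Char) : Int :=
  (PySem.List.enumerate cs).foldl (fun last ic => if ic.2 = '-' then ic.1 else last) (-1)

theorem accF_snoc (l : List Char) (c : Char) :
    accF (l ++ [c]) = if c = '-' then (l.length : Int) else accF l := by
  simp [accF, PySem.List.enumerate_append, List.foldl_append, PySem.List.enumerate_cons,
    PySem.List.enumerate_nil]

theorem accF_lb (l : List Char) : -1 ≤ accF l := by
  induction l using List.reverseRecOn with
  | nil => simp [accF]
  | append_singleton l c ih => rw [accF_snoc]; split <;> omega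

theorem accF_lt (l : List Char) : accF l < l.length := by
  induction l using List.reverseRecOn with
  | nil => simp [accF]
  | append_singleton l c ih =>
    rw [accF_snoc]
    simp only [List.length_append, List.length_singleton]
    split <;> (push_cast; omega)

theorem accF_after (l : List Char) (j : Nat) (h : accF l < (j : Int)) :
    l[j]? ≠ some '-' := by
  induction l using List.reverseRecOn with
  | nil => simp
  | append_singleton l c ih =>
    rw [accF_snoc] at h
    rcases lt_trichotomy j l.length with hj | hj | hj
    · rw [List.getElem?_append_left hj]
      apply ih
      have := accF_lt l
      split at h <;> omega
    · subst hj
      rw [List.getElem?_concat_length]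
      by_cases hc : c = '-'
      · rw [if_pos hc] at h; omega
      · simp [hc]
    · rw [List.getElem?_eq_none (by simp; omega)]
      simp

theorem accF_take_succ (cs : List Char) (j : Nat) :
    accF (cs.take (j + 1)) =
      if cs[j]? = some '-' then (j : Int) else accF (cs.take j) := by
  rw [List.take_add_one]
  cases hj : cs[j]? with
  | none => simp
  | some c =>
    have hlen : (cs.take j).length = j := by
      have : j < cs.length := List.getElem?_eq_some_iff.mp hj |>.1
      simp [List.length_take]; omega
    show accF (List.take j cs ++ [c]) = _
    rw [accF_snoc, hlen]
    simp

theorem accF_take_ext (cs : List Char) (a b : Nat) (hab : a ≤ b)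
    (h : ∀ j : Nat, a ≤ j → j < b → cs[j]? ≠ some '-') :
    accF (cs.take b) = accF (cs.take a) := by
  induction b, hab using Nat.le_induction with
  | base => rfl
  | succ b hab ih =>
    rw [accF_take_succ, if_neg (h b hab (by omega))]
    exact ih (fun j hj1 hj2 => h j hj1 (by omega))

theorem isPrefixOf_hyphen (cs : List Char) :
    (['-'].isPrefixOf cs = true) ↔ cs[0]? = some '-' := by
  cases cs with
  | nil => simp [List.isPrefixOf]
  | cons c t =>
    simp only [List.isPrefixOf, Bool.and_true, beq_iff_eq,
      List.getElem?_cons_zero, Option.some.injEq]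
    exact eq_comm

theorem go_eq_accF (cs : List Char) (k : Nat) :
    PySem.Chars.rfind.go cs ['-'] k = accF (cs.take (k + 1)) := by
  induction k with
  | zero =>
    rw [PySem.Chars.rfind.go.eq_1, accF_take_succ]
    by_cases h : cs[0]? = some '-'
    · rw [if_pos ((isPrefixOf_hyphen cs).mpr h), if_pos h]; simp
    · rw [if_neg (fun hh => h ((isPrefixOf_hyphen cs).mp hh)), if_neg h]
      rfl
  | succ j ih =>
    rw [PySem.Chars.rfind.go.eq_2, accF_take_succ, ih]
    have hdrop : (cs.drop (j+1))[0]? = cs[j+1]? := by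
      rw [List.getElem?_drop]
    by_cases h : cs[j+1]? = some '-'
    · rw [if_pos (by rw [isPrefixOf_hyphen, hdrop]; exact h), if_pos h]
    · rw [if_neg (by rw [isPrefixOf_hyphen, hdrop]; exact h), if_neg h]

theorem rfindFrom_eq_accF (cs : List Char) (e : Int) (h0 : 0 ≤ e) (hl : e ≤ cs.length) :
    PySem.Chars.rfindFrom cs ['-'] 0 (some e) = accF (cs.take e.toNat) := by
  have h1 : ¬ ((cs.length:Int) < e) := by omega
  have h2 : ¬ (e < (0:Int)) := by omega
  have hgo : PySem.Chars.rfind (List.take e.toNat cs) ['-'] = accF (cs.take e.toNat) := by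
    unfold PySem.Chars.rfind
    rw [go_eq_accF]
    rw [List.take_take]
    have hmin : min ((List.take e.toNat cs).length + 1) e.toNat = e.toNat := by
      simp only [List.length_take]; omega
    rw [hmin]
  simp only [PySem.Chars.rfindFrom, h1, h2, if_false, lt_irrefl, Int.toNat_zero,
    List.drop_zero, hgo]
  by_cases hr : accF (cs.take e.toNat) = -1
  · rw [if_pos hr, hr]
  · rw [if_neg hr]; omega

theorem cropLoop_stop (base : String) (maxLength : Int) (fuel : Nat) (k : Int)
    (h : ¬ maxLength < k) : cropLoop base maxLength fuel k = k := by
  cases fuel <;> simp [cropLoop, h]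

theorem cropLoop_spec (base : String) (maxLength : Int) (hm : -1 ≤ maxLength) :
    ∀ (fuel : Nat) (k : Int), 0 ≤ k → k ≤ base.toList.length → k.toNat < fuel →
      cropLoop base maxLength fuel k =
        if k ≤ maxLength then k else accF (base.toList.take (maxLength + 1).toNat) := by
  intro fuel
  induction fuel with
  | zero => intro k _ _ hf; omega
  | succ fuel ih =>
    intro k hk0 hkl hf
    by_cases hkm : k ≤ maxLength
    · rw [cropLoop_stop _ _ _ _ (by omega), if_pos hkm]
    · rw [if_neg hkm]
      have hcond : maxLength < k := by omega
      show (if maxLength < k then _ else _) = _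
      rw [if_pos hcond]
      have hrf : PySem.Str.rfindFrom base "-" 0 (some k) = accF (base.toList.take k.toNat) := by
        rw [PySem.Str.rfindFrom_eq]
        exact rfindFrom_eq_accF base.toList k hk0 hkl
      set cs := base.toList with hcs
      rw [hrf]
      have hlb := accF_lb (cs.take k.toNat)
      have hlt : accF (cs.take k.toNat) < (k.toNat : Int) := by
        have := accF_lt (cs.take k.toNat)
        simp only [List.length_take] at this
        omega
      by_cases hk'm : accF (cs.take k.toNat) ≤ maxLength
      · -- the loop stops at the next test; its value over take k equals B's over take (maxLength+1)
        rw [cropLoop_stop _ _ _ _ (by omega)]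
        have hext : accF (cs.take k.toNat) = accF (cs.take (maxLength + 1).toNat) := by
          rw [accF_take_ext cs (maxLength + 1).toNat k.toNat (by omega)]
          intro j hj1 hj2 hjc
          have hja : accF (cs.take k.toNat) < (j : Int) := by omega
          have := accF_after (cs.take k.toNat) j hja
          rw [List.getElem?_take_of_lt (by omega)] at this
          exact this hjc
        rw [hext]
      · have hrec := ih (accF (cs.take k.toNat)) (by omega) (by
            have : (cs.take k.toNat).length ≤ cs.length := by
              simp [List.length_take]
            omega) (by omega)
        rw [hrec, if_neg hk'm]

theorem slice_full (base : String) :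
    PySem.Str.slice base none (some ((base.toList.length : Int))) = base := by
  rw [← String.toList_inj]
  rw [PySem.Str.toList_slice, PySem.Chars.slice_eq_listSlice, PySem.List.slice_to _ (by omega)]
  simp

theorem main_thm (base : String) (maxLength : Int) (hm : -1 ≤ maxLength) :
    cropName base maxLength = cropName_alt base maxLength := by
  have hloop := cropLoop_spec base maxLength hm (base.toList.length + 2) (base.toList.length)
      (by omega) (by omega) (by omega)
  have hfuel : ((base.toList.length : Int)).toNat + 2 = base.toList.length + 2 := by omega
  have hlast : (PySem.List.enumerate (PySem.Str.slice base none (some (maxLength + 1))).toList).foldl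
        (fun last ic => if ic.2 = '-' then ic.1 else last) (-1)
      = accF (base.toList.take (maxLength + 1).toNat) := by
    rw [PySem.Str.toList_slice, PySem.Chars.slice_eq_listSlice, PySem.List.slice_to _ (by omega)]
    rfl
  simp only [cropName, cropName_alt, PySem.Str.len_eq, hfuel, hloop, hlast]
  by_cases hfit : ((base.toList.length : Int)) ≤ maxLength
  · rw [if_pos hfit, if_pos hfit]
    have h1 : ¬ (((base.toList.length : Int)) = -1 ∧ maxLength < base.toList.length) := by omega
    rw [if_neg h1]
    by_cases hz : 0 < ((base.toList.length : Int))
    · rw [if_pos hz, slice_full]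
    · rw [if_neg hz]
  · rw [if_neg hfit, if_neg hfit]
    by_cases h1 : accF (base.toList.take (maxLength + 1).toNat) = -1
    · rw [if_pos (⟨h1, by omega⟩ : _ ∧ maxLength < ((base.toList.length : Int))), if_pos h1]
    · rw [if_neg (by simp [h1]), if_neg h1]

-- ===== VERDICT (by name: the statement is the Claim_ definition above) =====
theorem cropName_spec : Claim_equal_cropName := by
  intro base maxLength _hDom hPre
  show cropName base maxLength = cropName_alt base maxLength
  exact main_thm base maxLength hPre
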